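-- pv_equiv track=rewrite | github.com/haolunc/ARC-RL | reference_solutions/solutions/f5b8619d.py | transform
-- ===== SOURCE A (Python) =====
-- def transform(grid):
--
--     h = len(grid)
--     w = len(grid[0])
--
--     col_has_nonzero = [any(grid[i][j] != 0 for i in range(h)) for j in range(w)]
--
--     out_h, out_w = 2 * h, 2 * w
--     out = [[0] * out_w for _ in range(out_h)]
--
--     for i in range(out_h):
--         for j in range(out_w):
--             orig_val = grid[i % h][j % w]
--             if orig_val == 0 and col_has_nonzero[j % w]:
--                 out[i][j] = 8
--             else:
--                 out[i][j] = orig_val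
--
--     return out
-- ===== SOURCE B (Python) =====
-- def transform(grid):
--     w = len(grid[0])
--     cols_nz = [any(row[j] != 0 for row in grid) for j in range(w)]
--     block = [[8 if row[j] == 0 and cols_nz[j] else row[j] for j in range(w)]
--              for row in grid]
--     doubled = [r + r for r in block]
--     return [list(r) for r in doubled + doubled]
-- ===== Notes on version B (the rewrite author's own statement) =====
-- stated objective: simpler
-- what changed: Instead of filling a preallocated 2h x 2w array cell by cell with modulo indexing, B transforms the h x w block once (one comprehension pass per row, reusing the column-nonzero precompute) and tiles it 2x2 by list concatenation (row+row, then doubling the row list), avoiding per-cell index arithmetic and assignment.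
import Mathlib
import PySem

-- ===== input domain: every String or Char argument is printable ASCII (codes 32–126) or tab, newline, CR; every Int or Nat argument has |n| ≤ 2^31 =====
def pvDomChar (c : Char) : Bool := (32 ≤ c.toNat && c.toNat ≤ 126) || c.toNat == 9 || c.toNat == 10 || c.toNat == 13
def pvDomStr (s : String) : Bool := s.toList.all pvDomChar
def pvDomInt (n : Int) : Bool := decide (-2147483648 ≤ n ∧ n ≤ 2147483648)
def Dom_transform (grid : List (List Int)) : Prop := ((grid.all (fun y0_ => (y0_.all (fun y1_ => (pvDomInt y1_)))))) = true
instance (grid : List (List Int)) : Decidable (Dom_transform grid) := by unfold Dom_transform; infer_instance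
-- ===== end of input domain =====

-- B replaces A's cell-by-cell fill of a preallocated 2h×2w array (modulo indexing) by
-- transforming the h×w block once and tiling it 2×2 with list concatenation (simpler).

-- ===== PORT A =====
def transform (grid : List (List Int)) : List (List Int) :=
  let h : Nat := grid.length
  let w : Nat := ((PySem.List.pyGet? grid 0).getD []).length
  let colHasNonzero : List Bool :=
    (PySem.List.pyRange 0 (w : Int) 1).map (fun j =>
      (PySem.List.pyRange 0 (h : Int) 1).any (fun i =>
        PySem.List.pyGetD (PySem.List.pyGetD grid i []) j 0 != 0))
  (PySem.List.pyRange 0 (2 * (h : Int)) 1).map (fun i =>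
    (PySem.List.pyRange 0 (2 * (w : Int)) 1).map (fun j =>
      let origVal := PySem.List.pyGetD (PySem.List.pyGetD grid (PySem.Int.mod i h) [])
        (PySem.Int.mod j w) 0
      if origVal = 0 ∧ PySem.List.pyGetD colHasNonzero (PySem.Int.mod j w) false = true
      then 8 else origVal))

-- ===== PORT B =====
def transform_alt (grid : List (List Int)) : List (List Int) :=
  let w : Nat := ((PySem.List.pyGet? grid 0).getD []).length
  let colsNz : List Bool :=
    (List.range w).map (fun j => grid.any (fun row => row.getD j 0 != 0))
  let block : List (List Int) := grid.map (fun row =>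
    (List.range w).map (fun j =>
      if row.getD j 0 = 0 ∧ colsNz.getD j false = true then 8 else row.getD j 0))
  let doubled := block.map (fun r => r ++ r)
  doubled ++ doubled

-- ===== PRECONDITION & SPEC =====
-- Pre_ excludes exactly the inputs on which the Python A raises: the empty grid
-- (IndexError on grid[0]) and ragged grids with some row shorter than the first row
-- (IndexError on grid[i][j]).
def Pre_transform (grid : List (List Int)) : Prop :=
  grid ≠ [] ∧ ∀ row ∈ grid, grid.headI.length ≤ row.length
instance (grid : List (List Int)) : Decidable (Pre_transform grid) := by
  unfold Pre_transform; infer_instance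
def pvWitness_transform : List (List Int) := [[0, 1], [2, 0]]
def Spec_transform (grid : List (List Int)) (out : List (List Int)) : Prop := out = transform_alt grid
instance (grid : List (List Int)) (out : List (List Int)) : Decidable (Spec_transform grid out) := by unfold Spec_transform; infer_instance

-- ===== CLAIM (what is proved, stated in full; the proofs are below) =====
def Claim_equal_transform : Prop := ∀ (grid : List (List Int)), Dom_transform grid → Pre_transform grid → Spec_transform grid (transform grid)

-- ===== LEMMAS AND PROOFS =====

theorem pyGet0_getD_eq_headI (grid : List (List Int)) :
    ((PySem.List.pyGet? grid 0).getD []) = grid.headI := by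
  cases grid
  · rfl
  · simp [List.headI]

theorem any_range_getD {α : Type} (l : List α) (d : α) (p : α → Bool) :
    ((List.range l.length).any fun k => p (l.getD k d)) = l.any p := by
  induction l with
  | nil => simp
  | cons x xs ih =>
    rw [List.length_cons, List.range_succ_eq_map]
    simp only [List.any_cons, List.any_map, Function.comp_def, List.getD_cons_zero,
      List.getD_cons_succ]
    rw [show ((List.range xs.length).any fun k => p (xs.getD k d)) = xs.any p from ih]

theorem map_range_getD {α β : Type} (l : List α) (d : α) (f : α → β) :
    ((List.range l.length).map fun k => f (l.getD k d)) = l.map f := by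
  induction l with
  | nil => simp
  | cons x xs ih =>
    rw [List.length_cons, List.range_succ_eq_map]
    simp only [List.map_cons, List.map_map, Function.comp_def, List.getD_cons_zero,
      List.getD_cons_succ]
    rw [show ((List.range xs.length).map fun k => f (xs.getD k d)) = xs.map f from ih]

theorem tile_map {β : Type} (n : Nat) (g : Nat → β) :
    (List.range (n + n)).map (fun i => g (i % n)) =
      (List.range n).map g ++ (List.range n).map g := by
  rw [List.range_add, List.map_append, List.map_map]
  refine congrArg₂ _ ?_ ?_
  · exact List.map_congr_left fun i hi => by
      rw [Nat.mod_eq_of_lt (List.mem_range.mp hi)]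
  · exact List.map_congr_left fun i hi => by
      simp only [Function.comp, Nat.add_mod_left]
      rw [Nat.mod_eq_of_lt (List.mem_range.mp hi)]

-- ===== VERDICT (by name: the statement is the Claim_ definition above) =====
theorem transform_spec : Claim_equal_transform := by
  intro grid _ _
  unfold Spec_transform transform transform_alt
  have hcast2 : ∀ n : Nat, (2 * (n : Int)) = ((n + n : Nat) : Int) := by
    intro n; push_cast; ring
  simp only [pyGet0_getD_eq_headI, hcast2, PySem.List.pyRange_zero_natCast,
    List.map_map, List.any_map, Function.comp_def, PySem.Int.mod_natCast,
    PySem.List.pyGetD_natCast]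
  have hcol : (List.range grid.headI.length).map
      (fun j => (List.range grid.length).any fun i => (grid.getD i []).getD j 0 != 0)
      = (List.range grid.headI.length).map (fun j => grid.any fun row => row.getD j 0 != 0) :=
    List.map_congr_left fun j _ => any_range_getD grid [] (fun row => row.getD j 0 != 0)
  rw [hcol]
  refine Eq.trans (List.map_congr_left fun i _ =>
    tile_map grid.headI.length (fun j => if (grid.getD (i % grid.length) []).getD j 0 = 0 ∧ ((List.range grid.headI.length).map fun j => grid.any fun row => row.getD j 0 != 0).getD j false = true then (8:Int) else (grid.getD (i % grid.length) []).getD j 0)) ?_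
  refine Eq.trans (tile_map grid.length (fun a =>
    (List.range grid.headI.length).map (fun j => if (grid.getD (a) []).getD j 0 = 0 ∧ ((List.range grid.headI.length).map fun j => grid.any fun row => row.getD j 0 != 0).getD j false = true then (8:Int) else (grid.getD (a) []).getD j 0) ++
    (List.range grid.headI.length).map (fun j => if (grid.getD (a) []).getD j 0 = 0 ∧ ((List.range grid.headI.length).map fun j => grid.any fun row => row.getD j 0 != 0).getD j false = true then (8:Int) else (grid.getD (a) []).getD j 0))) ?_
  exact congrArg₂ (· ++ ·) (map_range_getD grid [] (fun row => (List.range grid.headI.length).map (fun j => if (row).getD j 0 = 0 ∧ ((List.range grid.headI.length).map fun j => grid.any fun row => row.getD j 0 != 0).getD j false = true then (8:Int) else (row).getD j 0) ++ (List.range grid.headI.length).map (fun j => if (row).getD j 0 = 0 ∧ ((List.range grid.headI.length).map fun j => grid.any fun row => row.getD j 0 != 0).getD j false = true then (8:Int) else (row).getD j 0))) (map_range_getD grid [] (fun row => (List.range grid.headI.length).map (fun j => if (row).getD j 0 = 0 ∧ ((List.range grid.headI.length).map fun j => grid.any fun row => row.getD j 0 != 0).getD j false = true then (8:Int) else (row).getD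 j 0) ++ (List.range grid.headI.length).map (fun j => if (row).getD j 0 = 0 ∧ ((List.range grid.headI.length).map fun j => grid.any fun row => row.getD j 0 != 0).getD j false = true then (8:Int) else (row).getD j 0)))
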